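-- pv_equiv track=rewrite | github.com/dilzio/dsa | arrays/rotate1.py | revChunks
-- ===== SOURCE A (Python) =====
-- def revChunks(arr):
--     ret = []
--     tokens = get_chunks(arr)
--     for token in tokens:
--         token.reverse()
--         for c in token:
--             ret.append(c)
--     return ret
--
-- def get_chunks(arr):
--     ret = []
--     chunk = []
--     for x in arr:
--         if x == 0:
--             if chunk:
--                 ret.append(chunk)
--                 chunk = []
--         else:
--             chunk.append(x)
--     if chunk:
--         ret.append(chunk)
--     return ret
-- ===== SOURCE B (Python) =====
-- def revChunks(arr):
--     # Single pass, no chunk lists: inserting each non-zero element at the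
--     # position recorded at the last zero reverses each run in place.
--     ret = []
--     mark = 0
--     for x in arr:
--         if x == 0:
--             mark = len(ret)
--         else:
--             ret.insert(mark, x)
--     return ret
-- ===== Notes on version B (the rewrite author's own statement) =====
-- stated objective: alternative
-- what changed: B replaces the chunk-collection pass plus per-chunk reversal with a single pass that inserts each non-zero element at the index recorded at the last zero, which reverses each run in place without any intermediate list of chunks.
import Mathlib
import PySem

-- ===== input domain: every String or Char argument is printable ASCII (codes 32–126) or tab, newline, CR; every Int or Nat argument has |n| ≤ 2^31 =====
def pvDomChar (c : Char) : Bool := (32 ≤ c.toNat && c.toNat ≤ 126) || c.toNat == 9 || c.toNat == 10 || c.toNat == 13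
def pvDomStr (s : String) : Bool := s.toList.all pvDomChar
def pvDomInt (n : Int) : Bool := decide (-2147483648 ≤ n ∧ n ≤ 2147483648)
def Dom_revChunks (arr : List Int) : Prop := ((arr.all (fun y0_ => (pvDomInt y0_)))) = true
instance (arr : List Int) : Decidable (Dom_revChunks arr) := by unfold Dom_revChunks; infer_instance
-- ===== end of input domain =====

-- B differs from A: one pass inserting each non-zero element at the index recorded
-- at the last zero, instead of collecting chunks and reversing each (alternative decomposition).

-- ===== PORT A =====
-- get_chunks' loop state: (ret, chunk)
def getChunksStep (p : List (List Int) × List Int) (x : Int) : List (List Int) × List Int :=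
  if x = 0 then (if p.2 = [] then p else (p.1 ++ [p.2], [])) else (p.1, p.2 ++ [x])

def getChunks (arr : List Int) : List (List Int) :=
  let p := arr.foldl getChunksStep ([], [])
  if p.2 = [] then p.1 else p.1 ++ [p.2]

def revChunks (arr : List Int) : List Int :=
  (getChunks arr).foldl (fun ret token => ret ++ token.reverse) []

-- ===== PORT B =====
-- B's loop state: (ret, mark)
def revChunksAltStep (p : List Int × Int) (x : Int) : List Int × Int :=
  if x = 0 then (p.1, (p.1.length : Int)) else (PySem.List.insert p.1 p.2 x, p.2)

def revChunks_alt (arr : List Int) : List Int :=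
  (arr.foldl revChunksAltStep ([], 0)).1

-- ===== PRECONDITION & SPEC =====
def Spec_revChunks (arr : List Int) (out : List Int) : Prop := out = revChunks_alt arr
instance (arr : List Int) (out : List Int) : Decidable (Spec_revChunks arr out) := by unfold Spec_revChunks; infer_instance

-- ===== CLAIM (what is proved, stated in full; the proofs are below) =====
def Claim_equal_revChunks : Prop := ∀ (arr : List Int), Dom_revChunks arr → Spec_revChunks arr (revChunks arr)

-- ===== LEMMAS AND PROOFS =====

-- flattened value of A's chunk list (each chunk reversed)
def flatRev (ts : List (List Int)) : List Int := (ts.map List.reverse).flatten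

theorem foldl_rev_eq_flatRev (ts : List (List Int)) (acc : List Int) :
    ts.foldl (fun ret token => ret ++ token.reverse) acc = acc ++ flatRev ts := by
  induction ts generalizing acc with
  | nil => simp [flatRev]
  | cons t ts ih => simp [List.foldl, ih, flatRev]

theorem insert_split (a b : List Int) (x : Int) :
    PySem.List.insert (a ++ b) ((a.length : Int)) x = a ++ x :: b := by
  rw [PySem.List.insert_natCast (a ++ b) a.length x (by simp)]
  simp

-- main loop invariant
theorem loop_inv (arr : List Int) (q : List (List Int) × List Int) :
    (arr.foldl revChunksAltStep (flatRev q.1 ++ q.2.reverse, ((flatRev q.1).length : Int))).1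
      = flatRev (arr.foldl getChunksStep q).1 ++ ((arr.foldl getChunksStep q).2).reverse := by
  induction arr generalizing q with
  | nil => simp
  | cons x xs ih =>
    simp only [List.foldl]
    by_cases hx : x = 0
    · subst hx
      by_cases hc : q.2 = []
      · have h1 : revChunksAltStep (flatRev q.1 ++ q.2.reverse, ((flatRev q.1).length : Int)) 0
            = (flatRev q.1 ++ q.2.reverse, ((flatRev q.1).length : Int)) := by
          simp [revChunksAltStep, hc]
        have h2 : getChunksStep q 0 = q := by simp [getChunksStep, hc]
        rw [h1, h2, ih]
      · have h1 : revChunksAltStep (flatRev q.1 ++ q.2.reverse, ((flatRev q.1).length : Int)) 0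
            = (flatRev (q.1 ++ [q.2]) ++ ([] : List Int).reverse,
               ((flatRev (q.1 ++ [q.2])).length : Int)) := by
          simp [revChunksAltStep, flatRev]
        have h2 : getChunksStep q 0 = (q.1 ++ [q.2], []) := by simp [getChunksStep, hc]
        rw [h1, h2]
        exact ih (q.1 ++ [q.2], [])
    · have h1 : revChunksAltStep (flatRev q.1 ++ q.2.reverse, ((flatRev q.1).length : Int)) x
          = (flatRev q.1 ++ (q.2 ++ [x]).reverse, ((flatRev q.1).length : Int)) := by
        simp [revChunksAltStep, hx, insert_split]
      have h2 : getChunksStep q x = (q.1, q.2 ++ [x]) := by simp [getChunksStep, hx]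
      rw [h1, h2]
      exact ih (q.1, q.2 ++ [x])

-- ===== VERDICT (by name: the statement is the Claim_ definition above) =====
theorem revChunks_spec : Claim_equal_revChunks := by
  intro arr _
  show revChunks arr = revChunks_alt arr
  have h := loop_inv arr ([], [])
  simp only [flatRev, List.map_nil, List.flatten_nil, List.length_nil, Nat.cast_zero,
    List.reverse_nil, List.nil_append] at h
  rw [revChunks_alt, h, revChunks, getChunks, foldl_rev_eq_flatRev]
  by_cases hc : (arr.foldl getChunksStep ([], [])).2 = [] <;>
    simp [hc, flatRev]
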